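-- pv_equiv track=rewrite | github.com/kajyuuen/pytorch-ner | src/labeling_tools/labeler.py | _entity_type2labels
-- ===== SOURCE A (Python) =====
-- def _entity_type2labels(entity_type, length):
--     if entity_type == "O":
--         raise AssertionError
--     if length == 1:
--         return ["S-" + entity_type]
--     labels = []
--     for i in range(length):
--         if i == 0:
--             labels.append("B-" + entity_type)
--         elif i == length - 1:
--             labels.append("E-" + entity_type)
--         else:
--             labels.append("I-" + entity_type)
--     return labels
-- ===== SOURCE B (Python) =====
-- def _entity_type2labels(entity_type, length):
--     if entity_type == "O":
--         raise AssertionError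
--     if length == 1:
--         return ["S-" + entity_type]
--     if length < 2:
--         return []
--     return ["B-" + entity_type] + ["I-" + entity_type] * (length - 2) + ["E-" + entity_type]
-- ===== Notes on version B (the rewrite author's own statement) =====
-- stated objective: simpler
-- what changed: Replaces the per-index loop with three branches with a closed-form three-segment concatenation B + I*(length-2) + E (plus the same O/length==1 guards and an empty result for length<2).
import Mathlib
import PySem

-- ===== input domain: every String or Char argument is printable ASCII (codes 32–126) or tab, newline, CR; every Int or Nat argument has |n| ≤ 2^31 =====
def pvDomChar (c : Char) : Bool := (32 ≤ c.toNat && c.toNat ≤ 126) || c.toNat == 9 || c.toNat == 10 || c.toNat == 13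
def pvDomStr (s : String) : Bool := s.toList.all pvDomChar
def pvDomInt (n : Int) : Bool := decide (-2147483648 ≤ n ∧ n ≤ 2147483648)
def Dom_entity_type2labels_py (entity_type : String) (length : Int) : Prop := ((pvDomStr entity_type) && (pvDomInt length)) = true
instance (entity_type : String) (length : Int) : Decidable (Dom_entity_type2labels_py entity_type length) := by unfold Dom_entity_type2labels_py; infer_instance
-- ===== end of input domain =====

-- B replaces A's per-index loop-with-branches by a closed-form three-segment
-- concatenation; objective: simpler. Pre_ excludes entity_type = "O", where A raises AssertionError.


-- ===== PORT A =====
def entity_type2labels_py (entity_type : String) (length : Int) : List String :=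
  if entity_type = "O" then []   -- A raises AssertionError here; excluded by Pre_
  else if length = 1 then ["S-" ++ entity_type]
  else
    (PySem.List.pyRange 0 length 1).foldl
      (fun labels i =>
        if i = 0 then labels ++ ["B-" ++ entity_type]
        else if i = length - 1 then labels ++ ["E-" ++ entity_type]
        else labels ++ ["I-" ++ entity_type]) []

-- ===== PORT B =====
def entity_type2labels_py_alt (entity_type : String) (length : Int) : List String :=
  if entity_type = "O" then []   -- B raises AssertionError here; excluded by Pre_
  else if length = 1 then ["S-" ++ entity_type]
  else if length < 2 then []
  else ["B-" ++ entity_type] ++ List.replicate (length - 2).toNat ("I-" ++ entity_type)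
         ++ ["E-" ++ entity_type]

-- ===== PRECONDITION & SPEC =====
-- A raises AssertionError exactly when entity_type = "O"; those inputs are excluded.
def Pre_entity_type2labels_py (entity_type : String) (length : Int) : Prop := entity_type ≠ "O"
instance (entity_type : String) (length : Int) : Decidable (Pre_entity_type2labels_py entity_type length) := by unfold Pre_entity_type2labels_py; infer_instance
def pvWitness_entity_type2labels_py : String × Int := ("PER", 3)

def Spec_entity_type2labels_py (entity_type : String) (length : Int) (out : List String) : Prop := out = entity_type2labels_py_alt entity_type length
instance (entity_type : String) (length : Int) (out : List String) : Decidable (Spec_entity_type2labels_py entity_type length out) := by unfold Spec_entity_type2labels_py; infer_instance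

-- ===== CLAIM (what is proved, stated in full; the proofs are below) =====
def Claim_equal_entity_type2labels_py : Prop := ∀ (entity_type : String) (length : Int), Dom_entity_type2labels_py entity_type length → Pre_entity_type2labels_py entity_type length → Spec_entity_type2labels_py entity_type length (entity_type2labels_py entity_type length)

-- ===== LEMMAS AND PROOFS =====

-- appending fold = map
theorem foldl_append_map {α β : Type} (g : α → β) (l : List α) (init : List β) :
    l.foldl (fun acc i => acc ++ [g i]) init = init ++ l.map g := by
  induction l generalizing init with
  | nil => simp
  | cons x xs ih => simp [List.foldl, ih]

-- mapping the head/middle/last selector over range (m+2)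
theorem map_range_bies (b e i : String) (m : Nat) :
    (List.range (m + 2)).map
        (fun k : Nat => if (k : Int) = 0 then b
          else if (k : Int) = (m : Int) + 1 then e else i)
      = [b] ++ List.replicate m i ++ [e] := by
  rw [List.range_succ, List.map_append]
  have h1 : (List.range (m + 1)).map
      (fun k : Nat => if (k : Int) = 0 then b
        else if (k : Int) = (m : Int) + 1 then e else i)
      = [b] ++ List.replicate m i := by
    induction m with
    | zero => simp
    | succ n ih =>
      rw [List.range_succ, List.map_append]
      have hn : (List.range (n + 1)).map
          (fun k : Nat => if (k : Int) = 0 then b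
            else if (k : Int) = ((n + 1 : Nat) : Int) + 1 then e else i)
          = [b] ++ List.replicate n i := by
        rw [← ih]
        apply List.map_congr_left
        intro k hk
        simp only [List.mem_range] at hk
        have h2 : (k : Int) ≠ (n : Int) + 1 := by omega
        have h3 : (k : Int) ≠ (n : Int) + 1 + 1 := by omega
        simp [h2, h3]
      rw [hn]
      have h4 : ((n + 1 : Nat) : Int) ≠ 0 := by omega
      simp [List.replicate_succ']
  rw [h1]
  have h6 : ((m + 1 : Nat) : Int) ≠ 0 := by omega
  have h7 : ((m + 1 : Nat) : Int) = (m : Int) + 1 := by push_cast; ring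
  simp [h7]

-- ===== VERDICT (by name: the statement is the Claim_ definition above) =====
theorem entity_type2labels_py_spec : Claim_equal_entity_type2labels_py := by
  intro et n _ hpre
  unfold Spec_entity_type2labels_py entity_type2labels_py entity_type2labels_py_alt
  rw [if_neg hpre, if_neg hpre]
  by_cases h1 : n = 1
  · simp [h1]
  rw [if_neg h1, if_neg h1]
  by_cases h2 : n < 2
  · -- range is empty
    rw [if_pos h2]
    have : (n - 0).toNat = 0 := by omega
    rw [PySem.List.pyRange_one, this]
    simp
  · rw [if_neg h2]
    push_neg at h2
    have hbody : (fun (labels : List String) (i : Int) =>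
        if i = 0 then labels ++ ["B-" ++ et]
        else if i = n - 1 then labels ++ ["E-" ++ et]
        else labels ++ ["I-" ++ et])
      = fun labels i => labels ++
          [if i = 0 then "B-" ++ et else if i = n - 1 then "E-" ++ et else "I-" ++ et] := by
      funext labels i; split_ifs <;> rfl
    rw [PySem.List.pyRange_one, hbody, foldl_append_map]
    have hm : (n - 0).toNat = (n - 2).toNat + 2 := by omega
    rw [hm, List.map_map]
    have := map_range_bies ("B-" ++ et) ("E-" ++ et) ("I-" ++ et) (n - 2).toNat
    rw [List.nil_append]
    rw [← this]
    apply List.map_congr_left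
    intro k hk
    simp only [List.mem_range] at hk
    have h0 : (0 : Int) + (k : Int) = (k : Int) := by ring
    have hlast : ((n - 2).toNat : Int) + 1 = n - 1 := by omega
    simp only [Function.comp, h0, hlast]
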